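-- pv_equiv track=rewrite | github.com/naakt/Kyberone | Cryptography/Imperial Encryptions/encrypt_polybius.py | encrypt_polybius_square
-- ===== SOURCE A (Python) =====
-- def encrypt_polybius_square(plaintext, polybius_square):
--     ciphertext = ''
--
--     # Convert the plaintext to uppercase
--     plaintext = plaintext.upper()
--
--     # Remove any whitespace from the plaintext
--     plaintext = plaintext.replace(' ', '')
--
--     # Encrypt each letter of the plaintext
--     for letter in plaintext:
--         if letter == 'J':
--             letter = 'I'  # Replace 'J' with 'I' in the plaintext
--         # Find the letter in the Polybius Square grid and get its coordinates
--         for row in range(len(polybius_square)):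
--             for col in range(len(polybius_square[row])):
--                 if polybius_square[row][col] == letter:
--                     # Convert the coordinates to a pair of numbers and add them to the ciphertext
--                     ciphertext += str(row + 1) + str(col + 1)
--
--     return ciphertext
-- ===== SOURCE B (Python) =====
-- def encrypt_polybius_square(plaintext, polybius_square):
--     # Build the coordinate table once: each letter maps to its row/column pair.
--     index = {}
--     for row, cells in enumerate(polybius_square):
--         for col, cell in enumerate(cells):
--             index[cell] = str(row + 1) + str(col + 1)
--
--     text = plaintext.upper().replace(' ', '')
--     return ''.join(index.get('I' if ch == 'J' else ch, '') for ch in text)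
-- ===== Notes on version B (the rewrite author's own statement) =====
-- stated objective: faster
-- what changed: Replaces A's full nested grid scan per plaintext letter with a coordinate dict built in one grid pass, then one lookup per letter; Pre_ excludes grids with duplicate cell values, where A accidentally concatenates every occurrence's coordinates while a dict keeps one pair per letter.
-- outside the precondition, e.g. on encrypt_polybius_square('A', [['A', 'A']]): A returns '1112', B returns '12'
import Mathlib
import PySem

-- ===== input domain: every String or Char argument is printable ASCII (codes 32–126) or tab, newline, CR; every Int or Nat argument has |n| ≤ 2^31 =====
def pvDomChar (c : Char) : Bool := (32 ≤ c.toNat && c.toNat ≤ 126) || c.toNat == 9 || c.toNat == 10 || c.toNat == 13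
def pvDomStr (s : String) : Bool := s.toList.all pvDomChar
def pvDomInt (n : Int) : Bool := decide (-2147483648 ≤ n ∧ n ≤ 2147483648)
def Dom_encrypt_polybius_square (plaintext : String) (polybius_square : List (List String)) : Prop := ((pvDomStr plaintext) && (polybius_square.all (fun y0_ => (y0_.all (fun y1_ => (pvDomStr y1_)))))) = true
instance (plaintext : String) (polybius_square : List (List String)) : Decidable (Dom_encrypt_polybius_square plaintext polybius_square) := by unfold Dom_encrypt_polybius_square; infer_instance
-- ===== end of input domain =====

-- B builds the letter → coordinate-pair dict in one grid pass and then does one lookup per plaintext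
-- letter, instead of A's full nested grid scan for every letter; same return value on grids whose
-- cells are distinct (Pre_ below).

-- ===== PORT A =====
def encrypt_polybius_square (plaintext : String) (polybius_square : List (List String)) : String :=
  -- plaintext.upper().replace(' ', '')
  let pt := PySem.Str.replace (PySem.Str.upper plaintext) " " ""
  -- for letter in plaintext: nested scan over the whole grid, appending coordinates on a match
  pt.toList.foldl (fun ciphertext ch =>
    let letter := if String.mk [ch] == "J" then "I" else String.mk [ch]
    (PySem.List.pyRange 0 (polybius_square.length : Int) 1).foldl (fun ct row =>
      (PySem.List.pyRange 0 ((PySem.List.pyGetD polybius_square row []).length : Int) 1).foldl (fun ct col =>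
        if PySem.List.pyGetD (PySem.List.pyGetD polybius_square row []) col "" == letter then
          ct ++ PySem.Int.toStr (row + 1) ++ PySem.Int.toStr (col + 1)
        else ct) ct) ciphertext) ""

-- ===== PORT B =====
def encrypt_polybius_square_alt (plaintext : String) (polybius_square : List (List String)) : String :=
  -- index[cell] = str(row+1)+str(col+1)  over enumerate(grid)/enumerate(cells)
  let index : PySem.Dict String String :=
    (PySem.List.enumerate polybius_square 0).foldl (fun d rc =>
      (PySem.List.enumerate rc.2 0).foldl (fun d cc =>
        d.insert cc.2 (PySem.Int.toStr (rc.1 + 1) ++ PySem.Int.toStr (cc.1 + 1))) d)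
      PySem.Dict.empty
  -- ''.join(index.get('I' if ch == 'J' else ch, '') for ch in text)
  let text := PySem.Str.replace (PySem.Str.upper plaintext) " " ""
  PySem.Str.join "" (text.toList.map (fun ch =>
    index.getD (if String.mk [ch] == "J" then "I" else String.mk [ch]) ""))

-- ===== PRECONDITION & SPEC =====
-- Pre_ excludes inputs where some encrypted plaintext letter occurs more than once in the grid,
-- on which A accidentally concatenates the coordinates of every occurrence while a dict keeps a
-- single pair per letter.
def Pre_encrypt_polybius_square (plaintext : String) (polybius_square : List (List String)) : Prop :=
  ((PySem.Str.replace (PySem.Str.upper plaintext) " " "").toList.all (fun ch =>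
    polybius_square.flatten.count (if String.mk [ch] == "J" then "I" else String.mk [ch]) ≤ 1)) = true
instance (plaintext : String) (polybius_square : List (List String)) : Decidable (Pre_encrypt_polybius_square plaintext polybius_square) := by unfold Pre_encrypt_polybius_square; infer_instance

def pvWitness_encrypt_polybius_square : String × List (List String) :=
  ("Hi", [["H"], ["I"]])

def Spec_encrypt_polybius_square (plaintext : String) (polybius_square : List (List String)) (out : String) : Prop := out = encrypt_polybius_square_alt plaintext polybius_square
instance (plaintext : String) (polybius_square : List (List String)) (out : String) : Decidable (Spec_encrypt_polybius_square plaintext polybius_square out) := by unfold Spec_encrypt_polybius_square; infer_instance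

-- ===== CLAIM (what is proved, stated in full; the proofs are below) =====
def Claim_equal_encrypt_polybius_square : Prop := ∀ (plaintext : String) (polybius_square : List (List String)), Dom_encrypt_polybius_square plaintext polybius_square → Pre_encrypt_polybius_square plaintext polybius_square → Spec_encrypt_polybius_square plaintext polybius_square (encrypt_polybius_square plaintext polybius_square)

-- ===== LEMMAS AND PROOFS =====

-- the grid flattened to (cell, coordinate-pair) records in row-major order
def pvPairs (grid : List (List String)) : List (String × String) :=
  (PySem.List.enumerate grid 0).flatMap (fun rc =>
    (PySem.List.enumerate rc.2 0).map (fun cc =>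
      (cc.2, PySem.Int.toStr (rc.1 + 1) ++ PySem.Int.toStr (cc.1 + 1))))

theorem intercalate_nil_sep (xs : List (List Char)) : [].intercalate xs = xs.flatten := by
  induction xs with
  | nil => simp [List.intercalate]
  | cons a t ih =>
    cases t with
    | nil => simp [List.intercalate]
    | cons b r =>
      simp only [List.intercalate, List.intersperse, List.flatten_cons, List.flatten] at *
      simp_all

theorem strJoin_nil : PySem.Str.join "" ([] : List String) = "" := rfl

theorem strJoin_cons (s : String) (t : List String) :
    PySem.Str.join "" (s :: t) = s ++ PySem.Str.join "" t := by
  simp [PySem.Str.join, PySem.Chars.join, intercalate_nil_sep, String.ofList_append]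

theorem strJoin_append (a b : List String) :
    PySem.Str.join "" (a ++ b) = PySem.Str.join "" a ++ PySem.Str.join "" b := by
  induction a with
  | nil => simp [strJoin_nil]
  | cons x t ih => simp [strJoin_cons, ih, String.append_assoc]

-- an append-accumulating string fold is the join of the per-element contributions
theorem foldl_append_strJoin {α : Type} (l : List α) (g : α → String) (s0 : String) :
    l.foldl (fun s x => s ++ g x) s0 = s0 ++ PySem.Str.join "" (l.map g) := by
  induction l generalizing s0 with
  | nil => simp [strJoin_nil]
  | cons x t ih => simp [List.foldl_cons, ih, strJoin_cons, String.append_assoc]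

theorem strJoin_ite_filter {α : Type} (l : List α) (p : α → Bool) (f : α → String) :
    PySem.Str.join "" (l.map (fun x => if p x then f x else "")) =
      PySem.Str.join "" ((l.filter p).map f) := by
  induction l with
  | nil => rfl
  | cons x t ih =>
    by_cases h : p x <;> simp [h, strJoin_cons, ih]

theorem strJoin_flatMap {α : Type} (l : List α) (h : α → List String) :
    PySem.Str.join "" (l.map (fun x => PySem.Str.join "" (h x))) =
      PySem.Str.join "" (l.flatMap h) := by
  induction l with
  | nil => rfl
  | cons x t ih => simp [strJoin_cons, strJoin_append, ih]

theorem foldl_flatMap' {α β γ : Type} (l : List α) (f : α → List β) (g : γ → β → γ) (init : γ) :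
    (l.flatMap f).foldl g init = l.foldl (fun acc x => (f x).foldl g acc) init := by
  induction l generalizing init with
  | nil => rfl
  | cons x t ih => simp [List.flatMap_cons, List.foldl_append, ih]

-- folding inserts = last matching value (or the old one)
theorem getD_foldl_insert (l : List (String × String)) (d : PySem.Dict String String)
    (k v : String) :
    (l.foldl (fun d p => d.insert p.1 p.2) d).getD k v =
      (l.filter (fun p => p.1 == k)).foldl (fun _ p => p.2) (d.getD k v) := by
  induction l generalizing d with
  | nil => rfl
  | cons p t ih =>
    simp only [List.foldl_cons, List.filter_cons]
    by_cases h : p.1 = k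
    · subst h
      simp [ih, PySem.Dict.getD_insert_self]
    · have : (p.1 == k) = false := by simp [h]
      have hg : (d.insert p.1 p.2).getD k v = d.getD k v := by
        rw [PySem.Dict.getD_insert]; simp [Ne.symm h]
      simp [this, ih, hg]

-- when the key occurs at most once, the single matching value is the join of all matching values
theorem count_last_eq_join (l : List (String × String)) (k : String)
    (h : (l.map (·.1)).count k ≤ 1) :
    (l.filter (fun p => p.1 == k)).foldl (fun _ p => p.2) "" =
      PySem.Str.join "" ((l.filter (fun p => p.1 == k)).map (·.2)) := by
  induction l with
  | nil => rfl
  | cons p t ih =>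
    simp only [List.map_cons, List.count_cons] at h
    simp only [List.filter_cons]
    by_cases hk : p.1 = k
    · subst hk
      have hc : (t.map (·.1)).count p.1 = 0 := by
        simp only [beq_self_eq_true, if_pos] at h
        omega
      have ht : t.filter (fun q => q.1 == p.1) = [] := by
        rw [List.filter_eq_nil_iff]
        intro q hq
        simp only [beq_iff_eq]
        intro hqe
        exact (List.count_eq_zero.mp hc) (hqe ▸ List.mem_map_of_mem hq)
      simp [ht, strJoin_cons, strJoin_nil]
    · have hb : (p.1 == k) = false := by simp [hk]
      simp only [hb, Bool.false_eq_true, not_false_eq_true, if_neg]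
      exact ih (by omega)

-- the keys of pvPairs, in order, are the flattened grid
theorem map_fst_pvPairs (grid : List (List String)) :
    (pvPairs grid).map (·.1) = grid.flatten := by
  rw [pvPairs, List.map_flatMap]
  have : ∀ rc : Int × List String,
      ((PySem.List.enumerate rc.2 0).map (fun cc =>
        ((cc.2 : String), PySem.Int.toStr (rc.1 + 1) ++ PySem.Int.toStr (cc.1 + 1)))).map (·.1)
        = rc.2 := by
    intro rc
    rw [List.map_map]
    exact PySem.List.map_snd_enumerate _ _
  calc (PySem.List.enumerate grid 0).flatMap (fun rc =>
        ((PySem.List.enumerate rc.2 0).map (fun cc =>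
          (cc.2, PySem.Int.toStr (rc.1 + 1) ++ PySem.Int.toStr (cc.1 + 1)))).map (·.1))
      = (PySem.List.enumerate grid 0).flatMap (fun rc => rc.2) := by
        refine List.flatMap_congr ?_; intro rc _; exact this rc
    _ = ((PySem.List.enumerate grid 0).map (·.2)).flatten := by
        rw [List.flatMap_def]
    _ = grid.flatten := by rw [PySem.List.map_snd_enumerate]

-- B's index lookup, rewritten through pvPairs
theorem index_getD (grid : List (List String)) (letter : String) :
    (((PySem.List.enumerate grid 0).foldl (fun d rc =>
        (PySem.List.enumerate rc.2 0).foldl (fun d cc =>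
          d.insert cc.2 (PySem.Int.toStr (rc.1 + 1) ++ PySem.Int.toStr (cc.1 + 1))) d)
        PySem.Dict.empty).getD letter "") =
      ((pvPairs grid).filter (fun p => p.1 == letter)).foldl (fun _ p => p.2) "" := by
  have hfun : (fun (d : PySem.Dict String String) (rc : Int × List String) =>
      (PySem.List.enumerate rc.2 0).foldl (fun d cc =>
        d.insert cc.2 (PySem.Int.toStr (rc.1 + 1) ++ PySem.Int.toStr (cc.1 + 1))) d) =
      (fun (d : PySem.Dict String String) (rc : Int × List String) =>
        ((PySem.List.enumerate rc.2 0).map (fun cc =>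
          (cc.2, PySem.Int.toStr (rc.1 + 1) ++ PySem.Int.toStr (cc.1 + 1)))).foldl
          (fun d p => d.insert p.1 p.2) d) := by
    funext d rc; rw [List.foldl_map]
  rw [hfun, ← foldl_flatMap', ← pvPairs, getD_foldl_insert]
  have : (PySem.Dict.empty : PySem.Dict String String).getD letter "" = "" := rfl
  rw [this]

-- A's per-letter grid scan produces the join of the matching pairs' coordinates
theorem scan_eq (grid : List (List String)) (letter : String) (ct : String) :
    (PySem.List.pyRange 0 (grid.length : Int) 1).foldl (fun ct row =>
      (PySem.List.pyRange 0 ((PySem.List.pyGetD grid row []).length : Int) 1).foldl (fun ct col =>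
        if PySem.List.pyGetD (PySem.List.pyGetD grid row []) col "" == letter then
          ct ++ PySem.Int.toStr (row + 1) ++ PySem.Int.toStr (col + 1)
        else ct) ct) ct =
    ct ++ PySem.Str.join "" (((pvPairs grid).filter (fun p => p.1 == letter)).map (·.2)) := by
  have inner : ∀ (row : Int) (ct : String),
      (PySem.List.pyRange 0 ((PySem.List.pyGetD grid row []).length : Int) 1).foldl (fun ct col =>
        if PySem.List.pyGetD (PySem.List.pyGetD grid row []) col "" == letter then
          ct ++ PySem.Int.toStr (row + 1) ++ PySem.Int.toStr (col + 1)
        else ct) ct =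
      ct ++ PySem.Str.join ""
        ((PySem.List.enumerate (PySem.List.pyGetD grid row []) 0).map (fun cc =>
          if cc.2 == letter then PySem.Int.toStr (row + 1) ++ PySem.Int.toStr (cc.1 + 1) else "")) := by
    intro row ct
    have hb : (fun (ct : String) (col : Int) =>
        if PySem.List.pyGetD (PySem.List.pyGetD grid row []) col "" == letter then
          ct ++ PySem.Int.toStr (row + 1) ++ PySem.Int.toStr (col + 1)
        else ct) = (fun (ct : String) (col : Int) =>
        ct ++ (if PySem.List.pyGetD (PySem.List.pyGetD grid row []) col "" == letter then
          PySem.Int.toStr (row + 1) ++ PySem.Int.toStr (col + 1) else "")) := by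
      funext ct col
      split <;> simp [String.append_assoc]
    rw [hb, foldl_append_strJoin]
    congr 1
    rw [PySem.List.enumerate_eq_map_pyRange _ "", List.map_map]
    rfl
  have houter : (fun (ct : String) (row : Int) =>
      (PySem.List.pyRange 0 ((PySem.List.pyGetD grid row []).length : Int) 1).foldl (fun ct col =>
        if PySem.List.pyGetD (PySem.List.pyGetD grid row []) col "" == letter then
          ct ++ PySem.Int.toStr (row + 1) ++ PySem.Int.toStr (col + 1)
        else ct) ct) = (fun (ct : String) (row : Int) =>
      ct ++ PySem.Str.join ""
        ((PySem.List.enumerate (PySem.List.pyGetD grid row []) 0).map (fun cc =>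
          if cc.2 == letter then PySem.Int.toStr (row + 1) ++ PySem.Int.toStr (cc.1 + 1) else ""))) := by
    funext ct row; exact inner row ct
  rw [houter, foldl_append_strJoin]
  congr 1
  rw [pvPairs, List.filter_flatMap, List.map_flatMap, ← strJoin_flatMap,
      PySem.List.enumerate_eq_map_pyRange _ ([] : List String), List.map_map,
      PySem.List.len_eq]
  congr 1
  refine List.map_congr_left ?_
  intro row _
  simp only [Function.comp]
  rw [List.filter_map, List.map_map, ← strJoin_ite_filter]
  rfl

-- ===== VERDICT (by name: the statement is the Claim_ definition above) =====
theorem encrypt_polybius_square_spec : Claim_equal_encrypt_polybius_square := by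
  intro plaintext grid _ pre
  unfold Pre_encrypt_polybius_square at pre
  unfold Spec_encrypt_polybius_square encrypt_polybius_square encrypt_polybius_square_alt
  have hA : (fun (ciphertext : String) (ch : Char) =>
      (PySem.List.pyRange 0 (grid.length : Int) 1).foldl (fun ct row =>
        (PySem.List.pyRange 0 ((PySem.List.pyGetD grid row []).length : Int) 1).foldl (fun ct col =>
          if PySem.List.pyGetD (PySem.List.pyGetD grid row []) col "" ==
              (if String.mk [ch] == "J" then "I" else String.mk [ch]) then
            ct ++ PySem.Int.toStr (row + 1) ++ PySem.Int.toStr (col + 1)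
          else ct) ct) ciphertext) = (fun (ciphertext : String) (ch : Char) =>
      ciphertext ++ PySem.Str.join "" (((pvPairs grid).filter (fun p =>
        p.1 == (if String.mk [ch] == "J" then "I" else String.mk [ch]))).map (·.2))) := by
    funext ciphertext ch
    exact scan_eq grid _ ciphertext
  rw [hA, foldl_append_strJoin]
  simp only [index_getD]
  have hmap : (PySem.Str.replace (PySem.Str.upper plaintext) " " "").toList.map (fun ch =>
      PySem.Str.join "" (((pvPairs grid).filter (fun p =>
        p.1 == (if String.mk [ch] == "J" then "I" else String.mk [ch]))).map (·.2))) =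
    (PySem.Str.replace (PySem.Str.upper plaintext) " " "").toList.map (fun ch =>
      ((pvPairs grid).filter (fun p =>
        p.1 == (if String.mk [ch] == "J" then "I" else String.mk [ch]))).foldl
        (fun _ p => p.2) "") := by
    refine List.map_congr_left ?_
    intro ch hch
    have hcnt : ((pvPairs grid).map (·.1)).count
        (if String.mk [ch] == "J" then "I" else String.mk [ch]) ≤ 1 := by
      rw [map_fst_pvPairs]
      exact of_decide_eq_true (List.all_eq_true.mp pre ch hch)
    exact (count_last_eq_join _ _ hcnt).symm
  rw [hmap]
  simp
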